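-- pv_equiv track=rewrite | github.com/alibatkuldin/xxx | qt_py_n/qt_py_n/Call_history_api/src/Statistics.py | get_call_apps
-- ===== SOURCE A (Python) =====
-- from collections import defaultdict
--
-- def get_call_apps(data):
--     app_calls = defaultdict(lambda: {"incoming": 0, "outgoing": 0})
--
--     for val in data:
--         app = val.get("app")
--         call_type = val.get("type")
--         if app and call_type:
--             if call_type in ["incoming", "outgoing"]:
--                 app_calls[app][call_type] += 1
--
--     app_calls = dict(app_calls)
--     return app_calls
-- ===== SOURCE B (Python) =====
-- def get_call_apps(data):
--     # Phase 1: flat counter keyed by (app, type) over entries passing the guard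
--     counts = {}
--     for val in data:
--         app = val.get("app")
--         t = val.get("type")
--         if app and t in ("incoming", "outgoing"):
--             key = (app, t)
--             counts[key] = counts.get(key, 0) + 1
--     # Phase 2: reshape the flat table into the nested dict, both keys default 0
--     result = {}
--     for (app, t), n in counts.items():
--         if app not in result:
--             result[app] = {"incoming": 0, "outgoing": 0}
--         result[app][t] = n
--     return result
-- ===== Notes on version B (the rewrite author's own statement) =====
-- stated objective: alternative
-- what changed: A updates a nested defaultdict incrementally in one loop; B first builds a flat counter keyed by (app, type) tuples and then reshapes that table into the nested dict in a second pass, initializing both counters to 0 on first sight of each app.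
import Mathlib
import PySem

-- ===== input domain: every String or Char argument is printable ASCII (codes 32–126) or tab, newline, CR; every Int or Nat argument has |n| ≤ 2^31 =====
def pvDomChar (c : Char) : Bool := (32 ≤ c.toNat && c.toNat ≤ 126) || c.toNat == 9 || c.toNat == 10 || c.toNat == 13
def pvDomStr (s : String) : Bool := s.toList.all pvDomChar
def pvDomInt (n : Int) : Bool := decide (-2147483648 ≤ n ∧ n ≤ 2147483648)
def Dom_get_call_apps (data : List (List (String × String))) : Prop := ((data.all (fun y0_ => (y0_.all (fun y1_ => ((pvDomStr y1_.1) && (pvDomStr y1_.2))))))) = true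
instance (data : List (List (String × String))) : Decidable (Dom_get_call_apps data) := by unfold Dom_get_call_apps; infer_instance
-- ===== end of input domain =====

-- B replaces A's single incremental loop over a nested defaultdict by a flat (app,type) counter
-- built first and reshaped into the nested dict in a second pass (objective: alternative decomposition).

-- ===== PORT A =====
-- the defaultdict's default value {"incoming": 0, "outgoing": 0}
def pvDefInner : PySem.Dict String Int := PySem.Dict.mk [("incoming", 0), ("outgoing", 0)]

-- one iteration of A's loop; inner[call_type] += 1 is modify with default 0 — exact, since
-- call_type is always a key of the inner dict (it comes from pvDefInner, which has both keys)
def pvStepA (d : PySem.Dict String (PySem.Dict String Int)) (val : List (String × String)) :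
    PySem.Dict String (PySem.Dict String Int) :=
  match (PySem.Dict.mk val).get? "app", (PySem.Dict.mk val).get? "type" with
  | some app, some t =>
      if app ≠ "" ∧ t ≠ "" then
        if t = "incoming" ∨ t = "outgoing" then
          d.insert app ((d.getD app pvDefInner).modify t 0 (· + 1))
        else d
      else d
  | _, _ => d

def get_call_apps (data : List (List (String × String))) : List (String × List (String × Int)) :=
  (data.foldl pvStepA PySem.Dict.empty).items.map (fun p => (p.1, p.2.items))

-- ===== PORT B =====
-- phase 1 of B: one iteration of the flat-counter loop
def pvStepC (c : PySem.Dict (String × String) Int) (val : List (String × String)) :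
    PySem.Dict (String × String) Int :=
  match (PySem.Dict.mk val).get? "app", (PySem.Dict.mk val).get? "type" with
  | some app, some t =>
      if app ≠ "" ∧ (t = "incoming" ∨ t = "outgoing") then
        c.insert (app, t) (c.getD (app, t) 0 + 1)
      else c
  | _, _ => c

-- phase 2 of B: one iteration of the reshaping loop over the counter's items
def pvReshapeStep (r : PySem.Dict String (PySem.Dict String Int)) (q : (String × String) × Int) :
    PySem.Dict String (PySem.Dict String Int) :=
  let r1 := if r.contains q.1.1 then r
            else r.insert q.1.1 (PySem.Dict.mk [("incoming", 0), ("outgoing", 0)])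
  r1.insert q.1.1 ((r1.getD q.1.1 PySem.Dict.empty).insert q.1.2 q.2)

def get_call_apps_alt (data : List (List (String × String))) : List (String × List (String × Int)) :=
  let counts := data.foldl pvStepC PySem.Dict.empty
  (counts.items.foldl pvReshapeStep PySem.Dict.empty).items.map (fun p => (p.1, p.2.items))

-- ===== PRECONDITION & SPEC =====
def Spec_get_call_apps (data : List (List (String × String))) (out : List (String × List (String × Int))) : Prop := out = get_call_apps_alt data
instance (data : List (List (String × String))) (out : List (String × List (String × Int))) : Decidable (Spec_get_call_apps data out) := by unfold Spec_get_call_apps; infer_instance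

-- ===== CLAIM (what is proved, stated in full; the proofs are below) =====
def Claim_equal_get_call_apps : Prop := ∀ (data : List (List (String × String))), Dom_get_call_apps data → Spec_get_call_apps data (get_call_apps data)

-- ===== LEMMAS AND PROOFS =====

-- the common guard: the (app, type) pair a record contributes, if any
def pvExtract (val : List (String × String)) : Option (String × String) :=
  match (PySem.Dict.mk val).get? "app", (PySem.Dict.mk val).get? "type" with
  | some app, some t =>
      if app ≠ "" ∧ (t = "incoming" ∨ t = "outgoing") then some (app, t) else none
  | _, _ => none

def pvValid (data : List (List (String × String))) : List (String × String) :=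
  data.filterMap pvExtract

def pvBump (d : PySem.Dict String (PySem.Dict String Int)) (p : String × String) :
    PySem.Dict String (PySem.Dict String Int) :=
  d.insert p.1 ((d.getD p.1 pvDefInner).modify p.2 0 (· + 1))

-- first-match value of key k in an item list, 0 if absent
def pvLook (qs : List ((String × String) × Int)) (k : String × String) : Int :=
  ((qs.find? (fun q => q.1 == k)).map (·.2)).getD 0

def pvRow (f : String × String → Int) (a : String) : String × PySem.Dict String Int :=
  (a, PySem.Dict.mk [("incoming", f (a, "incoming")), ("outgoing", f (a, "outgoing"))])

theorem stepA_eq (d : PySem.Dict String (PySem.Dict String Int)) (val : List (String × String)) :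
    pvStepA d val = (pvExtract val).elim d (pvBump d) := by
  unfold pvStepA pvExtract pvBump
  cases (PySem.Dict.mk val).get? "app" <;> cases (PySem.Dict.mk val).get? "type" <;>
    simp only [Option.elim]
  split_ifs with h1 h2 h3 <;> simp_all

theorem stepC_eq (c : PySem.Dict (String × String) Int) (val : List (String × String)) :
    pvStepC c val = (pvExtract val).elim c (fun p => c.insert p (c.getD p 0 + 1)) := by
  unfold pvStepC pvExtract
  cases (PySem.Dict.mk val).get? "app" <;> cases (PySem.Dict.mk val).get? "type" <;>
    simp only [Option.elim]
  split_ifs <;> simp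

theorem mk2_modify (x y : Int) (t : String) (ht : t = "incoming" ∨ t = "outgoing") :
    (PySem.Dict.mk [("incoming", x), ("outgoing", y)]).modify t 0 (· + 1)
      = if t = "incoming" then PySem.Dict.mk [("incoming", x + 1), ("outgoing", y)]
        else PySem.Dict.mk [("incoming", x), ("outgoing", y + 1)] := by
  rcases ht with h | h <;> subst h <;>
    simp [PySem.Dict.modify, PySem.Dict.insert, PySem.Dict.getD, PySem.Dict.get?]

theorem mk2_insert (x y n : Int) (t : String) (ht : t = "incoming" ∨ t = "outgoing") :
    (PySem.Dict.mk [("incoming", x), ("outgoing", y)]).insert t n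
      = if t = "incoming" then PySem.Dict.mk [("incoming", n), ("outgoing", y)]
        else PySem.Dict.mk [("incoming", x), ("outgoing", n)] := by
  rcases ht with h | h <;> subst h <;> simp [PySem.Dict.insert]

-- A's loop characterized: items = one row per app (first-occurrence order), counts per type
theorem foldA_items (ps : List (String × String))
    (h : ∀ p ∈ ps, p.2 = "incoming" ∨ p.2 = "outgoing") :
    (ps.foldl pvBump PySem.Dict.empty).items
      = (PySem.Set.ofList (ps.map Prod.fst)).map (pvRow (fun k => (ps.count k : Int))) := by
  induction ps using List.reverseRecOn with
  | nil => rfl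
  | append_singleton ps p ih =>
    have hps : ∀ q ∈ ps, q.2 = "incoming" ∨ q.2 = "outgoing" :=
      fun q hq => h q (List.mem_append_left _ hq)
    have hp : p.2 = "incoming" ∨ p.2 = "outgoing" := h p (by simp)
    have ih' := ih hps
    rw [List.foldl_append, List.foldl_cons, List.foldl_nil]
    set F := ps.foldl pvBump PySem.Dict.empty with hF
    have hkeys : F.keys = PySem.Set.ofList (ps.map Prod.fst) := by
      simp [PySem.Dict.keys, ih', pvRow, List.map_map, Function.comp_def]
    have hnodup : F.keys.Nodup := by rw [hkeys]; exact PySem.Set.nodup_ofList _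
    have hcnt : ∀ k : String × String, ((ps ++ [p]).count k : Int)
        = (ps.count k : Int) + (if p = k then 1 else 0) := by
      intro k
      rw [List.count_append]
      by_cases hpk : p = k <;> simp [hpk]
    rw [List.map_append]
    simp only [List.map_cons, List.map_nil]
    rw [PySem.Set.ofList_append_singleton]
    by_cases hmem : p.1 ∈ ps.map Prod.fst
    · have hcont : F.contains p.1 = true := by
        rw [PySem.Dict.contains_eq_decide_mem_keys, hkeys]
        simp [PySem.Set.mem_ofList, hmem]
      have hrowmem : pvRow (fun k => (ps.count k : Int)) p.1 ∈ F.items := by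
        rw [ih']; exact List.mem_map_of_mem ((PySem.Set.mem_ofList _ _).mpr hmem)
      have hgetD : F.getD p.1 pvDefInner = (pvRow (fun k => (ps.count k : Int)) p.1).2 :=
        PySem.Dict.getD_of_mem_items F hrowmem hnodup pvDefInner
      rw [PySem.Set.add_of_mem ((PySem.Set.mem_ofList _ _).mpr hmem)]
      unfold pvBump
      rw [PySem.Dict.items_insert_of_contains F _ hcont, ih', hgetD, List.map_map]
      apply List.map_congr_left
      intro a ha
      rw [PySem.Set.mem_ofList] at ha
      by_cases hap : a = p.1
      · subst hap
        simp only [Function.comp, pvRow, beq_self_eq_true]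
        rw [mk2_modify _ _ _ hp]
        rcases hp with h2 | h2 <;>
          simp [h2, hcnt, List.count_cons, Prod.ext_iff]
      · simp only [Function.comp, pvRow]
        rw [if_neg (by simp [hap])]
        have : ∀ t, (ps ++ [p]).count (a, t) = ps.count (a, t) := by
          intro t; rw [List.count_append]
          have hne : p ≠ (a, t) := fun he => hap (congrArg Prod.fst he).symm
          simp [List.count_cons, hne]
        simp [this]
    · have hcont : F.contains p.1 = false := by
        rw [PySem.Dict.contains_eq_decide_mem_keys, hkeys]
        simp [PySem.Set.mem_ofList, hmem]
      have hgetD : F.getD p.1 pvDefInner = pvDefInner :=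
        PySem.Dict.getD_of_not_contains F pvDefInner hcont
      rw [PySem.Set.add_of_not_mem (by rw [PySem.Set.mem_ofList]; exact hmem)]
      unfold pvBump
      rw [PySem.Dict.items_insert_of_not_contains F _ hcont, ih', hgetD, List.map_append]
      congr 1
      · apply List.map_congr_left
        intro a ha
        rw [PySem.Set.mem_ofList] at ha
        have hap : a ≠ p.1 := fun he => hmem (he ▸ ha)
        have : ∀ t, (ps ++ [p]).count (a, t) = ps.count (a, t) := by
          intro t; rw [List.count_append]
          have hne : p ≠ (a, t) := fun he => hap (congrArg Prod.fst he).symm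
          simp [List.count_cons, hne]
        simp [pvRow, this]
      · have hzero : ∀ t, ps.count (p.1, t) = 0 := by
          intro t
          exact List.count_eq_zero.mpr (fun hc => hmem (List.mem_map.mpr ⟨_, hc, rfl⟩))
        simp only [List.map_cons, List.map_nil, pvRow, pvDefInner]
        rw [mk2_modify _ _ _ hp]
        rcases hp with h2 | h2 <;>
          simp [h2, hcnt, hzero, List.count_cons, Prod.ext_iff]

theorem pvLook_append_ne (qs : List ((String × String) × Int)) (q : (String × String) × Int)
    (k : String × String) (hk : k ≠ q.1) : pvLook (qs ++ [q]) k = pvLook qs k := by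
  unfold pvLook
  rw [List.find?_append]
  cases hq : qs.find? (fun r => r.1 == k) <;> simp [hq, Ne.symm hk]

theorem pvLook_append_self (qs : List ((String × String) × Int)) (q : (String × String) × Int)
    (hfresh : q.1 ∉ qs.map (·.1)) : pvLook (qs ++ [q]) q.1 = q.2 := by
  unfold pvLook
  rw [List.find?_append]
  have hnone : qs.find? (fun r => r.1 == q.1) = none :=
    List.find?_eq_none.mpr (fun x hx hbe =>
      hfresh (by rw [← beq_iff_eq.mp hbe]; exact List.mem_map_of_mem hx))
  simp [hnone]

theorem pvLook_fresh (qs : List ((String × String) × Int)) (k : String × String)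
    (h : k ∉ qs.map (·.1)) : pvLook qs k = 0 := by
  unfold pvLook
  have hnone : qs.find? (fun r => r.1 == k) = none :=
    List.find?_eq_none.mpr (fun x hx hbe =>
      h (by rw [← beq_iff_eq.mp hbe]; exact List.mem_map_of_mem hx))
  simp [hnone]

theorem pvLook_table (S : List (String × String)) (c : String × String → Int) (k : String × String) :
    pvLook (S.map (fun j => (j, c j))) k = if k ∈ S then c k else 0 := by
  induction S with
  | nil => simp [pvLook]
  | cons j S ih =>
    unfold pvLook at ih ⊢
    by_cases hjk : j = k
    · subst hjk; simp
    · rw [List.map_cons, List.find?_cons_of_neg (by simp [hjk]), ih]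
      simp [List.mem_cons, Ne.symm hjk]

-- B's reshape loop characterized the same way, over any item list with distinct keys
theorem reshape_items (qs : List ((String × String) × Int))
    (hnd : (qs.map (·.1)).Nodup)
    (h : ∀ q ∈ qs, q.1.2 = "incoming" ∨ q.1.2 = "outgoing") :
    (qs.foldl pvReshapeStep PySem.Dict.empty).items
      = (PySem.Set.ofList (qs.map (·.1.1))).map (pvRow (pvLook qs)) := by
  induction qs using List.reverseRecOn with
  | nil => rfl
  | append_singleton qs q ih =>
    have hnd' : (qs.map (·.1)).Nodup := by
      rw [List.map_append] at hnd; exact (List.nodup_append.mp hnd).1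
    have hfresh : q.1 ∉ qs.map (·.1) := by
      rw [List.map_append] at hnd
      rcases List.nodup_append.mp hnd with ⟨-, -, hdisj⟩
      exact fun hc => hdisj q.1 hc q.1 (by simp) rfl
    have hq : q.1.2 = "incoming" ∨ q.1.2 = "outgoing" := h q (by simp)
    have hqs : ∀ r ∈ qs, r.1.2 = "incoming" ∨ r.1.2 = "outgoing" :=
      fun r hr => h r (List.mem_append_left _ hr)
    have ih' := ih hnd' hqs
    rw [List.foldl_append, List.foldl_cons, List.foldl_nil]
    set R := qs.foldl pvReshapeStep PySem.Dict.empty with hR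
    have hkeys : R.keys = PySem.Set.ofList (qs.map (·.1.1)) := by
      simp [PySem.Dict.keys, ih', pvRow, List.map_map, Function.comp_def]
    have hnodup : R.keys.Nodup := by rw [hkeys]; exact PySem.Set.nodup_ofList _
    rw [List.map_append]
    simp only [List.map_cons, List.map_nil]
    rw [PySem.Set.ofList_append_singleton]
    by_cases hmem : q.1.1 ∈ qs.map (·.1.1)
    · have hcont : R.contains q.1.1 = true := by
        rw [PySem.Dict.contains_eq_decide_mem_keys, hkeys]
        simp [PySem.Set.mem_ofList, hmem]
      have hrowmem : pvRow (pvLook qs) q.1.1 ∈ R.items := by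
        rw [ih']; exact List.mem_map_of_mem ((PySem.Set.mem_ofList _ _).mpr hmem)
      have hgetD : R.getD q.1.1 PySem.Dict.empty = (pvRow (pvLook qs) q.1.1).2 :=
        PySem.Dict.getD_of_mem_items R hrowmem hnodup PySem.Dict.empty
      rw [PySem.Set.add_of_mem ((PySem.Set.mem_ofList _ _).mpr hmem)]
      simp only [pvReshapeStep, hcont, if_true]
      rw [PySem.Dict.items_insert_of_contains R _ hcont, ih', hgetD, List.map_map]
      apply List.map_congr_left
      intro a ha
      rw [PySem.Set.mem_ofList] at ha
      by_cases hap : a = q.1.1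
      · subst hap
        simp only [Function.comp, pvRow, beq_self_eq_true]
        rw [mk2_insert _ _ _ _ hq]
        have hself : pvLook (qs ++ [q]) q.1 = q.2 := pvLook_append_self qs q hfresh
        have hother : ∀ t, t ≠ q.1.2 →
            pvLook (qs ++ [q]) (q.1.1, t) = pvLook qs (q.1.1, t) :=
          fun t ht => pvLook_append_ne qs q _ (fun he => ht (congrArg Prod.snd he))
        rcases hq with h2 | h2
        · rw [if_pos h2]
          have e1 : (q.1.1, "incoming") = q.1 := by rw [← h2]
          simp [pvRow, e1, hself, hother "outgoing" (by rw [h2]; decide)]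
        · rw [if_neg (show ¬(q.1.2 = "incoming") by rw [h2]; decide)]
          have e1 : (q.1.1, "outgoing") = q.1 := by rw [← h2]
          simp [pvRow, e1, hself, hother "incoming" (by rw [h2]; decide)]
      · simp only [Function.comp, pvRow]
        rw [if_neg (by simp [hap])]
        have hne : ∀ t, pvLook (qs ++ [q]) (a, t) = pvLook qs (a, t) :=
          fun t => pvLook_append_ne qs q _ (fun he => hap (congrArg Prod.fst he))
        simp [hne]
    · have hcont : R.contains q.1.1 = false := by
        rw [PySem.Dict.contains_eq_decide_mem_keys, hkeys]
        simp [PySem.Set.mem_ofList, hmem]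
      rw [PySem.Set.add_of_not_mem (by rw [PySem.Set.mem_ofList]; exact hmem)]
      simp only [pvReshapeStep, hcont, if_false, Bool.false_eq_true]
      rw [PySem.Dict.getD_insert_self, PySem.Dict.insert_insert_self]
      rw [PySem.Dict.items_insert_of_not_contains R _ hcont, ih', List.map_append]
      congr 1
      · apply List.map_congr_left
        intro a ha
        rw [PySem.Set.mem_ofList] at ha
        have hap : a ≠ q.1.1 := fun he => hmem (he ▸ ha)
        have hne : ∀ t, pvLook (qs ++ [q]) (a, t) = pvLook qs (a, t) :=
          fun t => pvLook_append_ne qs q _ (fun he => hap (congrArg Prod.fst he))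
        simp [pvRow, hne]
      · have hz : ∀ t, t ≠ q.1.2 → pvLook (qs ++ [q]) (q.1.1, t) = 0 := by
          intro t ht
          rw [pvLook_append_ne qs q _ (fun he => ht (congrArg Prod.snd he))]
          exact pvLook_fresh qs _ (fun hc => hmem (by
            rcases List.mem_map.mp hc with ⟨r, hr, hre⟩
            exact List.mem_map.mpr ⟨r, hr, by rw [hre]⟩))
        have hself : pvLook (qs ++ [q]) q.1 = q.2 := pvLook_append_self qs q hfresh
        simp only [List.map_cons, List.map_nil, pvRow]
        rw [mk2_insert _ _ _ _ hq]
        rcases hq with h2 | h2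
        · rw [if_pos h2]
          have e1 : (q.1.1, "incoming") = q.1 := by rw [← h2]
          simp [e1, hself, hz "outgoing" (by rw [h2]; decide)]
        · rw [if_neg (show ¬(q.1.2 = "incoming") by rw [h2]; decide)]
          have e1 : (q.1.1, "outgoing") = q.1 := by rw [← h2]
          simp [e1, hself, hz "incoming" (by rw [h2]; decide)]

theorem foldA_filterMap (l : List (List (String × String)))
    (init : PySem.Dict String (PySem.Dict String Int)) :
    l.foldl pvStepA init = (l.filterMap pvExtract).foldl pvBump init := by
  induction l generalizing init with
  | nil => rfl
  | cons v l ih =>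
    rw [List.foldl_cons, stepA_eq, List.filterMap_cons]
    cases pvExtract v <;> simp [Option.elim, ih]

theorem foldC_filterMap (l : List (List (String × String)))
    (init : PySem.Dict (String × String) Int) :
    l.foldl pvStepC init
      = (l.filterMap pvExtract).foldl (fun c p => c.insert p (c.getD p 0 + 1)) init := by
  induction l generalizing init with
  | nil => rfl
  | cons v l ih =>
    rw [List.foldl_cons, stepC_eq, List.filterMap_cons]
    cases pvExtract v <;> simp [Option.elim, ih]

theorem setmap (vs : List (String × String)) :
    PySem.Set.ofList ((PySem.Set.ofList vs).map Prod.fst)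
      = PySem.Set.ofList (vs.map Prod.fst) := by
  induction vs using List.reverseRecOn with
  | nil => rfl
  | append_singleton vs p ih =>
    rw [PySem.Set.ofList_append_singleton, List.map_append, List.map_cons, List.map_nil,
        PySem.Set.ofList_append_singleton]
    by_cases hm : p ∈ PySem.Set.ofList vs
    · rw [PySem.Set.add_of_mem hm, ih,
        PySem.Set.add_of_mem ((PySem.Set.mem_ofList _ _).mpr
          (List.mem_map_of_mem ((PySem.Set.mem_ofList _ _).mp hm)))]
    · rw [PySem.Set.add_of_not_mem hm, List.map_append, List.map_cons, List.map_nil,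
        PySem.Set.ofList_append_singleton, ih]

theorem extract_type (val : List (String × String)) (p : String × String)
    (hev : pvExtract val = some p) : p.2 = "incoming" ∨ p.2 = "outgoing" := by
  unfold pvExtract at hev
  cases hg1 : (PySem.Dict.mk val).get? "app" with
  | none => rw [hg1] at hev; simp at hev
  | some app =>
    cases hg2 : (PySem.Dict.mk val).get? "type" with
    | none => rw [hg1, hg2] at hev; simp at hev
    | some t =>
      rw [hg1, hg2] at hev
      simp only at hev
      split_ifs at hev with hcond
      · rw [Option.some_inj] at hev
        subst hev
        exact hcond.2

-- ===== VERDICT (by name: the statement is the Claim_ definition above) =====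
theorem get_call_apps_spec : Claim_equal_get_call_apps := by
  intro data _
  unfold Spec_get_call_apps get_call_apps get_call_apps_alt
  simp only [foldA_filterMap, foldC_filterMap]
  set vs := data.filterMap pvExtract with hvs
  have hv : ∀ p ∈ vs, p.2 = "incoming" ∨ p.2 = "outgoing" := by
    intro p hp
    rcases List.mem_filterMap.mp hp with ⟨val, -, hev⟩
    exact extract_type val p hev
  rw [PySem.Dict.foldl_insert_getD_add_one_eq_counter, foldA_items vs hv,
      PySem.Dict.items_counter]
  set qs := (PySem.Set.ofList vs).map (fun k => (k, (vs.count k : Int))) with hqs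
  have hnd : (qs.map (·.1)).Nodup := by
    rw [hqs, List.map_map]
    simp [Function.comp_def, PySem.Set.nodup_ofList]
  have hty : ∀ r ∈ qs, r.1.2 = "incoming" ∨ r.1.2 = "outgoing" := by
    intro r hr
    rcases List.mem_map.mp hr with ⟨k, hk, rfl⟩
    exact hv k ((PySem.Set.mem_ofList _ _).mp hk)
  rw [reshape_items qs hnd hty]
  have happs : PySem.Set.ofList (qs.map (·.1.1)) = PySem.Set.ofList (vs.map Prod.fst) := by
    rw [hqs, List.map_map]
    have he : ((fun x => x.1.1) ∘ fun j => (j, (vs.count j : Int))) = Prod.fst := rfl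
    rw [he, setmap]
  have hlook : pvRow (pvLook qs) = pvRow (fun k => (vs.count k : Int)) := by
    have hk : ∀ k, pvLook qs k = (vs.count k : Int) := by
      intro k
      rw [hqs, pvLook_table]
      by_cases hm : k ∈ PySem.Set.ofList vs
      · rw [if_pos hm]
      · rw [if_neg hm,
          List.count_eq_zero.mpr (fun hc => hm ((PySem.Set.mem_ofList _ _).mpr hc))]
        simp
    funext a
    unfold pvRow
    rw [hk, hk]
  rw [happs, hlook]
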